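-- pv_equiv track=rewrite | github.com/0d-fako/SemiColon-Assignment | Codewar/codewars.py | unsorted
-- ===== SOURCE A (Python) =====
-- def unsorted(numbers:list)->list:
-- 	pairs = []
-- 	for index in range(len(numbers)):
-- 		for second_index in range(len(numbers)-1):
-- 			if  numbers[index] - numbers[second_index] == 3 :
-- 				if [numbers[second_index],numbers[index]] in pairs:continue
-- 				else:pairs.append([numbers[second_index],numbers[index]] )
-- 	return pairs
-- ===== SOURCE B (Python) =====
-- def unsorted(numbers: list) -> list:
--     values = set(numbers)
--     seen = set()
--     pairs = []
--     for b in numbers: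
--         if b not in seen:
--             seen.add(b)
--             if b - 3 in values:
--                 pairs.append([b - 3, b])
--     return pairs
-- ===== Notes on version B (the rewrite author's own statement) =====
-- stated objective: faster
-- what changed: Replaced the nested quadratic index loops with an appended-pair membership scan by a value set built once plus a single seen-set pass that emits [b-3, b] at the first occurrence of each matching b.
-- intended difference: When the last element occurs nowhere else in the list and its value plus 3 is also in the list, A's inner loop over range(len(numbers)-1) never considers that last value as the smaller element and silently omits the pair [last, last+3], while B includes it; the two values really differ by 3, so B's value is the intended one. — e.g. on unsorted([5, 2]): A returns [], B returns [[2, 5]]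
import Mathlib
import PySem

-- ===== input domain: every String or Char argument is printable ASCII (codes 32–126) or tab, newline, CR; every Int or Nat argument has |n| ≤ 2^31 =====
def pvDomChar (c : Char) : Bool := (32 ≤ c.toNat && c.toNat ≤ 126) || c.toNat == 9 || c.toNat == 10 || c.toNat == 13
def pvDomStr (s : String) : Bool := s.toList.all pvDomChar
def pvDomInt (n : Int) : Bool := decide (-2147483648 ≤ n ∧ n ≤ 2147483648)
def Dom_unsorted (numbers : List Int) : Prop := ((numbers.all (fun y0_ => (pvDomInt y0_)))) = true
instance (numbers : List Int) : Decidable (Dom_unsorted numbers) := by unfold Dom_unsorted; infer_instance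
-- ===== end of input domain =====

-- B replaces A's nested index loops (with a linear membership scan of the output) by a
-- value set built once plus a single seen-set pass: asymptotically faster; on the D_ inputs
-- below B emits a pair A's off-by-one inner loop drops.

-- ===== PORT A =====
def unsorted (numbers : List Int) : List (List Int) :=
  (PySem.List.pyRange 0 (numbers.length : Int) 1).foldl (fun pairs index =>
    (PySem.List.pyRange 0 ((numbers.length : Int) - 1) 1).foldl (fun pairs second_index =>
      if PySem.List.pyGetD numbers index 0 - PySem.List.pyGetD numbers second_index 0 = 3 then
        if [PySem.List.pyGetD numbers second_index 0, PySem.List.pyGetD numbers index 0] ∈ pairs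
        then pairs
        else pairs ++ [[PySem.List.pyGetD numbers second_index 0, PySem.List.pyGetD numbers index 0]]
      else pairs) pairs) []

-- ===== PORT B =====
def unsorted_alt (numbers : List Int) : List (List Int) :=
  let values : PySem.Set Int := PySem.Set.ofList numbers
  (numbers.foldl (fun (st : List (List Int) × PySem.Set Int) b =>
      if b ∈ st.2 then st
      else ((if b - 3 ∈ values then st.1 ++ [[b - 3, b]] else st.1), PySem.Set.add st.2 b))
    ([], PySem.Set.empty)).1

-- ===== PRECONDITION & SPEC =====
-- When the last element occurs nowhere else in the list and its value plus 3 is also in the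
-- list, A's inner loop over range(len(numbers)-1) never considers that last value as the
-- smaller element and silently omits the pair [last, last+3], while B includes it; the two
-- values really differ by 3, so B's value is the intended one.
def D_unsorted (numbers : List Int) : Prop :=
  ∃ b ∈ numbers, b - 3 ∈ numbers ∧ b - 3 ∉ numbers.dropLast
instance (numbers : List Int) : Decidable (D_unsorted numbers) := by unfold D_unsorted; infer_instance

def Spec_unsorted (numbers : List Int) (out : List (List Int)) : Prop :=
  ¬ D_unsorted numbers → out = unsorted_alt numbers
instance (numbers : List Int) (out : List (List Int)) : Decidable (Spec_unsorted numbers out) := by unfold Spec_unsorted; infer_instance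

def pvDiffWitness_unsorted : List Int := [5, 2]
def pvDiffWitnessOut_unsorted : (List (List Int)) × (List (List Int)) := ([], [[2, 5]])

-- ===== CLAIM (what is proved, stated in full; the proofs are below) =====
def Claim_unchanged_unsorted : Prop :=
  ∀ (numbers : List Int), Dom_unsorted numbers → Spec_unsorted numbers (unsorted numbers)
def Claim_changed_unsorted : Prop :=
  Dom_unsorted (pvDiffWitness_unsorted) ∧ D_unsorted (pvDiffWitness_unsorted) ∧
  unsorted (pvDiffWitness_unsorted) = pvDiffWitnessOut_unsorted.1 ∧
  unsorted_alt (pvDiffWitness_unsorted) = pvDiffWitnessOut_unsorted.2 ∧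
  pvDiffWitnessOut_unsorted.1 ≠ pvDiffWitnessOut_unsorted.2
def Claim_exact_unsorted : Prop :=
  ∀ (numbers : List Int), Dom_unsorted numbers → D_unsorted numbers →
    unsorted numbers ≠ unsorted_alt numbers

-- ===== LEMMAS AND PROOFS =====

-- A's inner loop over the candidate smaller values xs appends [b-3, b] exactly once,
-- iff b-3 occurs in xs and the pair is not already present.
theorem innerA_closed (xs : List Int) (b : Int) (pairs : List (List Int)) :
    xs.foldl (fun pairs a =>
      if b - a = 3 then (if [a, b] ∈ pairs then pairs else pairs ++ [[a, b]]) else pairs) pairs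
    = if b - 3 ∈ xs ∧ [b - 3, b] ∉ pairs then pairs ++ [[b - 3, b]] else pairs := by
  induction xs generalizing pairs with
  | nil => simp
  | cons x xs ih =>
    simp only [List.foldl_cons]
    by_cases hx : b - x = 3
    · have hxe : x = b - 3 := by omega
      subst hxe
      by_cases hm : [b - 3, b] ∈ pairs
      · simp [hx, hm, ih]
      · simp [hx, hm, ih]
    · have hne : b - 3 ≠ x := by omega
      rw [if_neg hx, ih]
      simp [List.mem_cons, hne]

-- A's inner pyRange loop is a fold over numbers.dropLast.
theorem inner_range_eq (numbers : List Int) (g : List (List Int) → Int → List (List Int))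
    (pairs : List (List Int)) :
    (PySem.List.pyRange 0 ((numbers.length : Int) - 1) 1).foldl
      (fun acc j => g acc (PySem.List.pyGetD numbers j 0)) pairs
    = numbers.dropLast.foldl g pairs := by
  rcases numbers.eq_nil_or_concat with h | ⟨ys, y, h⟩
  · subst h
    have hr : PySem.List.pyRange 0 ((([] : List Int).length : Int) - 1) 1 = [] := by decide
    rw [hr]
    rfl
  · rw [List.concat_eq_append] at h
    subst h
    have hlen : (((ys ++ [y]).length : Int)) - 1 = ((ys ++ [y]).dropLast.length : Int) := by
      simp
    rw [hlen]
    refine Eq.trans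
      (PySem.List.foldl_congr_mem _ _
        (fun acc j => g acc (PySem.List.pyGetD ((ys ++ [y]).dropLast) j 0)) pairs ?_)
      (PySem.List.foldl_pyRange_zero_pyGetD' ((ys ++ [y]).dropLast) 0 g pairs)
    intro acc x hx
    have hb := PySem.List.mem_pyRange_one.1 hx
    obtain ⟨n, rfl⟩ := Int.eq_ofNat_of_zero_le hb.1
    have hn : n < ys.length := by
      have := hb.2
      simp only [List.dropLast_concat] at this
      exact_mod_cast this
    congr 1
    rw [PySem.List.pyGetD_natCast, PySem.List.pyGetD_natCast, List.dropLast_concat,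
      List.getD_append ys [y] 0 n hn]

-- the heart: A's elementwise fold equals B's seen-set fold under the pair/seen invariant
theorem main_inv (small : List Int) (ys : List Int) (pairs out : List (List Int))
    (seen : PySem.Set Int) (hpo : pairs = out)
    (hinv : ∀ v : Int, [v - 3, v] ∈ pairs ↔ (v ∈ seen ∧ v - 3 ∈ small)) :
    ys.foldl (fun pairs b =>
        if b - 3 ∈ small ∧ [b - 3, b] ∉ pairs then pairs ++ [[b - 3, b]] else pairs) pairs
    = (ys.foldl (fun (st : List (List Int) × PySem.Set Int) b =>
        if b ∈ st.2 then st
        else ((if b - 3 ∈ PySem.Set.ofList small then st.1 ++ [[b - 3, b]] else st.1),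
          PySem.Set.add st.2 b)) (out, seen)).1 := by
  induction ys generalizing pairs out seen with
  | nil => simpa using hpo
  | cons b ys ih =>
    subst hpo
    simp only [List.foldl_cons]
    by_cases hb : b ∈ seen
    · rw [if_pos hb]
      have hA : ¬ (b - 3 ∈ small ∧ [b - 3, b] ∉ pairs) := by
        rintro ⟨hs, hnm⟩
        exact hnm ((hinv b).2 ⟨hb, hs⟩)
      rw [if_neg hA]
      exact ih pairs pairs seen rfl hinv
    · rw [if_neg hb]
      have hnm : [b - 3, b] ∉ pairs := fun h => hb ((hinv b).1 h).1
      by_cases hs : b - 3 ∈ small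
      · rw [if_pos ⟨hs, hnm⟩, if_pos ((PySem.Set.mem_ofList _ _).2 hs)]
        refine ih _ _ _ rfl ?_
        intro v
        constructor
        · intro hv
          rcases List.mem_append.1 hv with hv | hv
          · have := (hinv v).1 hv
            exact ⟨(PySem.Set.mem_add _ _ _).2 (Or.inl this.1), this.2⟩
          · have hvb : v = b := by
              simpa using (List.mem_singleton.1 hv)
            subst hvb
            exact ⟨(PySem.Set.mem_add _ _ _).2 (Or.inr rfl), hs⟩
        · rintro ⟨hv1, hv2⟩
          rcases (PySem.Set.mem_add _ _ _).1 hv1 with hv1 | hv1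
          · exact List.mem_append.2 (Or.inl ((hinv v).2 ⟨hv1, hv2⟩))
          · subst hv1; exact List.mem_append.2 (Or.inr (by simp))
      · rw [if_neg (fun h => hs h.1), if_neg (fun h => hs ((PySem.Set.mem_ofList _ _).1 h))]
        refine ih _ _ _ rfl ?_
        intro v
        rw [hinv v]
        constructor
        · rintro ⟨hv1, hv2⟩
          exact ⟨(PySem.Set.mem_add _ _ _).2 (Or.inl hv1), hv2⟩
        · rintro ⟨hv1, hv2⟩
          rcases (PySem.Set.mem_add _ _ _).1 hv1 with hv1 | hv1
          · exact ⟨hv1, hv2⟩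
          · subst hv1; exact absurd hv2 hs

-- A's nested loops collapse to one elementwise fold with candidates numbers.dropLast.
theorem unsorted_eq_elem (numbers : List Int) :
    unsorted numbers = numbers.foldl (fun pairs b =>
      if b - 3 ∈ numbers.dropLast ∧ [b - 3, b] ∉ pairs then pairs ++ [[b - 3, b]] else pairs) [] := by
  unfold unsorted
  rw [PySem.List.foldl_pyRange_zero_pyGetD' numbers 0
    (fun pairs b =>
      (PySem.List.pyRange 0 ((numbers.length : Int) - 1) 1).foldl (fun pairs second_index =>
        if b - PySem.List.pyGetD numbers second_index 0 = 3 then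
          if [PySem.List.pyGetD numbers second_index 0, b] ∈ pairs then pairs
          else pairs ++ [[PySem.List.pyGetD numbers second_index 0, b]]
        else pairs) pairs) []]
  refine PySem.List.foldl_congr_mem numbers _ _ [] (fun pairs b _ => ?_)
  rw [inner_range_eq numbers (fun pairs a =>
    if b - a = 3 then (if [a, b] ∈ pairs then pairs else pairs ++ [[a, b]]) else pairs) pairs]
  exact innerA_closed numbers.dropLast b pairs

-- every pair A ever appends is [c, c+3] with c a candidate smaller value
theorem A_shape (small ys : List Int) (pairs : List (List Int))
    (h : ∀ p ∈ pairs, ∃ c, p = [c, c + 3] ∧ c ∈ small) :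
    ∀ p ∈ ys.foldl (fun pairs b =>
        if b - 3 ∈ small ∧ [b - 3, b] ∉ pairs then pairs ++ [[b - 3, b]] else pairs) pairs,
      ∃ c, p = [c, c + 3] ∧ c ∈ small := by
  induction ys generalizing pairs with
  | nil => simpa using h
  | cons b ys ih =>
    simp only [List.foldl_cons]
    split_ifs with hc
    · refine ih _ ?_
      intro p hp
      rcases List.mem_append.1 hp with hp | hp
      · exact h p hp
      · have hpb : p = [b - 3, b] := by simpa using hp
        exact ⟨b - 3, by rw [hpb, show b - 3 + 3 = b from by omega], hc.1⟩
    · exact ih _ h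

-- B's pairs list only grows
theorem B_mono (values : PySem.Set Int) (ys : List Int)
    (st : List (List Int) × PySem.Set Int) (p : List Int) (h : p ∈ st.1) :
    p ∈ (ys.foldl (fun (st : List (List Int) × PySem.Set Int) b =>
        if b ∈ st.2 then st
        else ((if b - 3 ∈ values then st.1 ++ [[b - 3, b]] else st.1), PySem.Set.add st.2 b))
      st).1 := by
  induction ys generalizing st with
  | nil => exact h
  | cons b ys ih =>
    simp only [List.foldl_cons]
    split_ifs with h1 h2
    · exact ih st h
    · exact ih _ (List.mem_append.2 (Or.inl h))
    · exact ih _ h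

-- B emits [b-3, b] as soon as it reaches an unseen b with b-3 among the values
theorem B_hit (values : PySem.Set Int) (b : Int) (hv : b - 3 ∈ values) (ys : List Int)
    (st : List (List Int) × PySem.Set Int) (hys : b ∈ ys) (hseen : b ∉ st.2) :
    [b - 3, b] ∈ (ys.foldl (fun (st : List (List Int) × PySem.Set Int) b =>
        if b ∈ st.2 then st
        else ((if b - 3 ∈ values then st.1 ++ [[b - 3, b]] else st.1), PySem.Set.add st.2 b))
      st).1 := by
  induction ys generalizing st with
  | nil => cases hys
  | cons y ys ih =>
    simp only [List.foldl_cons]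
    by_cases hyb : y = b
    · subst hyb
      rw [if_neg hseen, if_pos hv]
      exact B_mono values ys _ _ (List.mem_append.2 (Or.inr (by simp)))
    · have hys' : b ∈ ys := by
        rcases List.mem_cons.1 hys with h | h
        · exact absurd h.symm hyb
        · exact h
      by_cases hy : y ∈ st.2
      · rw [if_pos hy]; exact ih _ hys' hseen
      · rw [if_neg hy]
        refine ih _ hys' ?_
        intro hmem
        rcases (PySem.Set.mem_add _ _ _).1 hmem with h | h
        · exact hseen h
        · exact hyb h.symm

-- ===== VERDICT (by name: the statement is the Claim_ definition above) =====
theorem unsorted_spec : Claim_unchanged_unsorted := by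
  intro numbers _ hD
  rw [unsorted_eq_elem]
  unfold unsorted_alt
  refine Eq.trans
    (PySem.List.foldl_congr_mem numbers _
      (fun pairs b =>
        if b - 3 ∈ numbers ∧ [b - 3, b] ∉ pairs then pairs ++ [[b - 3, b]] else pairs)
      [] ?_)
    (main_inv numbers numbers [] [] PySem.Set.empty rfl (by simp [PySem.Set.empty]))
  intro pairs b hbmem
  have hiff : b - 3 ∈ numbers.dropLast ↔ b - 3 ∈ numbers := by
    constructor
    · exact fun h => (List.dropLast_sublist _).mem h
    · intro h
      by_contra hnot
      exact hD ⟨b, hbmem, h, hnot⟩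
  simp only [hiff]

theorem unsorted_tight : Claim_exact_unsorted := by
  intro numbers _ hD heq
  obtain ⟨b, hb, hbn, hbd⟩ := hD
  have hBmem : [b - 3, b] ∈ unsorted_alt numbers := by
    unfold unsorted_alt
    exact B_hit (PySem.Set.ofList numbers) b ((PySem.Set.mem_ofList _ _).2 hbn) numbers
      ([], PySem.Set.empty) hb (by simp [PySem.Set.empty])
  have hAmem : [b - 3, b] ∈ unsorted numbers := heq ▸ hBmem
  rw [unsorted_eq_elem] at hAmem
  obtain ⟨c, hc, hcs⟩ := A_shape numbers.dropLast numbers [] (by simp) _ hAmem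
  have hcb : c = b - 3 := by injection hc with h1 _; exact h1.symm
  exact hbd (hcb ▸ hcs)

theorem unsorted_changed : Claim_changed_unsorted := by
  unfold Claim_changed_unsorted; decide
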